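-- pv_equiv track=rewrite | github.com/rebeccaBEEP/Projet_OPTIMISATION-COMPLEXITE | genetic.py | decode_chromosome
-- ===== SOURCE A (Python) =====
-- MOVES = [(1,0), (-1,0), (0,-1), (0,1)]  # D, G, H, B
--
-- def decode_chromosome(chromosome, start, grid):
--     """
--     Convertit une séquence de mouvements en positions.
--     Si un mouvement mène à un obstacle ou hors grille → on reste sur place.
--     """
--     path = [start]
--     current = start
--     for gene in chromosome:
--         dx, dy = MOVES[gene]
--         nx, ny = current[0] + dx, current[1] + dy
--         # Vérifier que le mouvement est valide
--         if 0 <= ny < len(grid) and 0 <= nx < len(grid[ny]):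
--             if grid[ny][nx] != 'X':
--                 current = (nx, ny)
--         path.append(current)
--     return path
-- ===== SOURCE B (Python) =====
-- MOVES = [(1,0), (-1,0), (0,-1), (0,1)]  # D, G, H, B
--
-- def _step(current, gene, grid):
--     dx, dy = MOVES[gene]
--     nx, ny = current[0] + dx, current[1] + dy
--     if 0 <= ny < len(grid) and 0 <= nx < len(grid[ny]) and grid[ny][nx] != 'X':
--         return (nx, ny)
--     return current
--
-- def decode_chromosome(chromosome, start, grid):
--     n = len(chromosome)
--     if n == 0:
--         return [start]
--     if n == 1:
--         return [start, _step(start, chromosome[0], grid)]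
--     mid = n // 2
--     left = decode_chromosome(chromosome[:mid], start, grid)
--     right = decode_chromosome(chromosome[mid:], left[-1], grid)
--     return left + right[1:]
-- ===== Notes on version B (the rewrite author's own statement) =====
-- stated objective: alternative
-- what changed: Replaced A's imperative maintain-current-and-append loop with a divide-and-conquer recursion that decodes each half of the chromosome and stitches the paths via the left half's last position.
import Mathlib
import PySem

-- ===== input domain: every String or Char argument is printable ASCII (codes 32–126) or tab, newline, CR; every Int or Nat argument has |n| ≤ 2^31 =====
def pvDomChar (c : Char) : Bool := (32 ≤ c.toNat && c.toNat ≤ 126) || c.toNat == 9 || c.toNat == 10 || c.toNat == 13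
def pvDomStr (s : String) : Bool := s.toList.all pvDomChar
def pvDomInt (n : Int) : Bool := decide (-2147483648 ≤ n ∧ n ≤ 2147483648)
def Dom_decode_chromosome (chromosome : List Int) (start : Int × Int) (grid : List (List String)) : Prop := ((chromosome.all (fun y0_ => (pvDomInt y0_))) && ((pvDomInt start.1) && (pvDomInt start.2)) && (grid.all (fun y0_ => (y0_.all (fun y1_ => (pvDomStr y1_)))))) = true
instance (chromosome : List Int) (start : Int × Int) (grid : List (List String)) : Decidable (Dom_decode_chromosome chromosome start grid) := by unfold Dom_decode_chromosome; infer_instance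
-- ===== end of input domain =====

-- B replaces A's imperative maintain-current-and-append loop by a divide-and-conquer
-- recursion on the chromosome (objective: alternative decomposition, not faster).

-- ===== PORT A =====
-- MOVES = [(1,0), (-1,0), (0,-1), (0,1)]
def pvMoves : List (Int × Int) := [(1, 0), (-1, 0), (0, -1), (0, 1)]

-- the body of A's for-loop, lifted to a named helper for readability:
-- given `current` and `gene`, returns the updated `current` (nested ifs as in A).
-- `MOVES[gene]` is `pyGet?` (none = IndexError, excluded by Pre_; we then keep `current`,
-- which is irrelevant inside Pre_); `grid[ny]` / `row[nx]` are read with `pyGetD`,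
-- exact because the guards ensure the index is in range.
def pvBodyA (grid : List (List String)) (current : Int × Int) (gene : Int) : Int × Int :=
  match PySem.List.pyGet? pvMoves gene with
  | none => current
  | some (dx, dy) =>
    let nx := current.1 + dx
    let ny := current.2 + dy
    if 0 ≤ ny ∧ ny < (grid.length : Int) ∧ 0 ≤ nx ∧
        nx < ((PySem.List.pyGetD grid ny []).length : Int) then
      if PySem.List.pyGetD (PySem.List.pyGetD grid ny []) nx "" ≠ "X" then (nx, ny)
      else current
    else current

def decode_chromosome (chromosome : List Int) (start : Int × Int) (grid : List (List String)) : List (Int × Int) :=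
  -- state = (path, current); the loop appends the (possibly updated) current each step
  (chromosome.foldl
    (fun (st : List (Int × Int) × (Int × Int)) gene =>
      let current := pvBodyA grid st.2 gene
      (st.1 ++ [current], current))
    ([start], start)).1

-- ===== PORT B =====
-- _step(current, gene, grid) of Source B: one combined validity condition
def pvStep (grid : List (List String)) (current : Int × Int) (gene : Int) : Int × Int :=
  match PySem.List.pyGet? pvMoves gene with
  | none => current  -- IndexError in Python, excluded by Pre_
  | some (dx, dy) =>
    let nx := current.1 + dx
    let ny := current.2 + dy
    if 0 ≤ ny ∧ ny < (grid.length : Int) ∧ 0 ≤ nx ∧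
        nx < ((PySem.List.pyGetD grid ny []).length : Int) ∧
        PySem.List.pyGetD (PySem.List.pyGetD grid ny []) nx "" ≠ "X" then (nx, ny)
    else current

-- divide and conquer: decode each half, stitch at the left half's last position.
-- chromosome[:mid] / chromosome[mid:] = take/drop (exact: 0 ≤ mid ≤ len);
-- left[-1] = getLastD (left is always nonempty); right[1:] = tail.
def decode_chromosome_alt : List Int → (Int × Int) → List (List String) → List (Int × Int)
  | [], start, _ => [start]
  | [g], start, grid => [start, pvStep grid start g]
  | g1 :: g2 :: rest, start, grid =>
    let chrom := g1 :: g2 :: rest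
    let mid := chrom.length / 2
    let left := decode_chromosome_alt (chrom.take mid) start grid
    let right := decode_chromosome_alt (chrom.drop mid) (left.getLastD start) grid
    left ++ right.tail
termination_by c _ _ => c.length
decreasing_by
  · simp; omega
  · simp; omega

-- ===== PRECONDITION & SPEC =====
-- Pre_ excludes exactly the inputs where A raises: MOVES[gene] is an IndexError
-- unless -4 ≤ gene < 4 (negative indices wrap into MOVES).
def Pre_decode_chromosome (chromosome : List Int) (start : Int × Int) (grid : List (List String)) : Prop :=
  ∀ g ∈ chromosome, -4 ≤ g ∧ g < 4

instance (chromosome : List Int) (start : Int × Int) (grid : List (List String)) : Decidable (Pre_decode_chromosome chromosome start grid) := by unfold Pre_decode_chromosome; infer_instance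

def pvWitness_decode_chromosome : List Int × (Int × Int) × List (List String) :=
  ([0, 2, 1, -1], (0, 0), [[".", "."], [".", "X"]])

def Spec_decode_chromosome (chromosome : List Int) (start : Int × Int) (grid : List (List String)) (out : List (Int × Int)) : Prop := out = decode_chromosome_alt chromosome start grid
instance (chromosome : List Int) (start : Int × Int) (grid : List (List String)) (out : List (Int × Int)) : Decidable (Spec_decode_chromosome chromosome start grid out) := by unfold Spec_decode_chromosome; infer_instance

-- ===== CLAIM (what is proved, stated in full; the proofs are below) =====
def Claim_equal_decode_chromosome : Prop := ∀ (chromosome : List Int) (start : Int × Int) (grid : List (List String)), Dom_decode_chromosome chromosome start grid → Pre_decode_chromosome chromosome start grid → Spec_decode_chromosome chromosome start grid (decode_chromosome chromosome start grid)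

-- ===== LEMMAS AND PROOFS =====

-- A's nested-if loop body computes the same update as B's single-condition step.
theorem pvBodyA_eq_pvStep (grid : List (List String)) (current : Int × Int) (gene : Int) :
    pvBodyA grid current gene = pvStep grid current gene := by
  unfold pvBodyA pvStep
  cases PySem.List.pyGet? pvMoves gene with
  | none => rfl
  | some p =>
    obtain ⟨dx, dy⟩ := p
    simp only
    split_ifs <;> first | rfl | tauto

-- the linear reference recursion (the scan both programs compute)
def pvRef (grid : List (List String)) : List Int → (Int × Int) → List (Int × Int)
  | [], c => [c]
  | g :: t, c => c :: pvRef grid t (pvStep grid c g)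

theorem pvRef_cons_head (grid : List (List String)) (l : List Int) (c : Int × Int) :
    ∃ t, pvRef grid l c = c :: t := by
  cases l <;> exact ⟨_, rfl⟩

theorem pvRef_getLastD (grid : List (List String)) (l : List Int) (c d : Int × Int) :
    (pvRef grid l c).getLastD d = l.foldl (pvStep grid) c := by
  induction l generalizing c d with
  | nil => rfl
  | cons g t ih =>
    simp only [pvRef, List.getLastD_cons, List.foldl_cons]
    exact ih _ _

theorem pvRef_append (grid : List (List String)) (l1 l2 : List Int) (c : Int × Int) :
    pvRef grid (l1 ++ l2) c =
      pvRef grid l1 c ++ (pvRef grid l2 (l1.foldl (pvStep grid) c)).tail := by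
  induction l1 generalizing c with
  | nil =>
    obtain ⟨t, ht⟩ := pvRef_cons_head grid l2 c
    simp [pvRef, ht]
  | cons g t ih =>
    simp only [List.cons_append, pvRef, List.foldl_cons, ih]

-- B's divide-and-conquer equals the linear reference recursion.
theorem alt_eq_ref (chromosome : List Int) (start : Int × Int) (grid : List (List String)) :
    decode_chromosome_alt chromosome start grid = pvRef grid chromosome start := by
  induction chromosome, start, grid using decode_chromosome_alt.induct with
  | case1 start grid => simp [decode_chromosome_alt, pvRef]
  | case2 g start grid => simp [decode_chromosome_alt, pvRef]
  | case3 g1 g2 rest start grid chrom mid left ih1 ih2 ih3 =>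
    rw [decode_chromosome_alt]
    simp only [chrom, mid, left] at ih1 ih3
    rw [ih1] at ih3 ⊢
    rw [ih3, pvRef_getLastD]
    conv_rhs => rw [show g1 :: g2 :: rest =
      (g1 :: g2 :: rest).take ((g1 :: g2 :: rest).length / 2) ++
      (g1 :: g2 :: rest).drop ((g1 :: g2 :: rest).length / 2) from (List.take_append_drop _ _).symm]
    rw [pvRef_append]

-- A's foldl loop equals the linear reference recursion.
theorem foldA_invariant (grid : List (List String)) (l : List Int)
    (p : List (Int × Int)) (c : Int × Int) :
    (l.foldl
      (fun (st : List (Int × Int) × (Int × Int)) gene =>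
        let current := pvBodyA grid st.2 gene
        (st.1 ++ [current], current)) (p, c)).1 = p ++ (pvRef grid l c).tail := by
  induction l generalizing p c with
  | nil => simp [pvRef]
  | cons g t ih =>
    rw [List.foldl_cons]
    have hstep : (let current := pvBodyA grid (p, c).2 g
        ((p, c).1 ++ [current], current))
        = (p ++ [pvBodyA grid c g], pvBodyA grid c g) := rfl
    rw [hstep, ih, pvBodyA_eq_pvStep]
    obtain ⟨t', ht⟩ := pvRef_cons_head grid t (pvStep grid c g)
    simp [pvRef, ht]

theorem a_eq_ref (chromosome : List Int) (start : Int × Int) (grid : List (List String)) :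
    decode_chromosome chromosome start grid = pvRef grid chromosome start := by
  unfold decode_chromosome
  rw [foldA_invariant]
  obtain ⟨t, ht⟩ := pvRef_cons_head grid chromosome start
  simp [ht]

-- ===== VERDICT (by name: the statement is the Claim_ definition above) =====
theorem decode_chromosome_spec : Claim_equal_decode_chromosome := by
  intro chromosome start grid _ _
  unfold Spec_decode_chromosome
  rw [a_eq_ref, alt_eq_ref]
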